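-- pv_equiv track=rewrite | github.com/hpreston/netbox-to-ise | netbox2ise/utils/conversion.py | diff_ise_groups
-- ===== SOURCE A (Python) =====
-- def diff_ise_groups(desired_groups, current_groups, desired_description=""):
--     """
--     Given a set of desired groups, and a dictionary for current ISE
--     network device groups, determine which groups exist already,
--     which are needed, and which exist in ISE but not listed as "desired".
--
--     :param desired_groups: A set of network device group names
--     :param current_groups: A dictionary of current ISE groups. {"group#name": {"id": "", "description": ""}}
--     :return results dictionary:
--         {
--             "correct": set('group#name')},
--             "incorrect": set('group#name')},
--             "missing": set('group#name')},
--             "extra": set('group#name')}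
--         }
--     """
--
--     set_current_groups = set(current_groups.keys())
--
--     missing_groups = desired_groups.difference(set_current_groups)
--     extra_groups = set_current_groups.difference(desired_groups)
--     existing_groups = desired_groups.intersection(set_current_groups)
--
--     correct_groups = set()
--     incorrect_groups = set()
--
--     for group in existing_groups:
--         if current_groups[group]["description"] != desired_description:
--             incorrect_groups.add(group)
--         else:
--             correct_groups.add(group)
--
--     return {
--         "correct": correct_groups,
--         "missing": missing_groups,
--         "extra": extra_groups,
--         "incorrect": incorrect_groups,
--     }
-- ===== SOURCE B (Python) =====
-- def diff_ise_groups(desired_groups, current_groups, desired_description=""):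
--     # Outer-join algorithm: merge both inputs into ONE record table
--     # group -> (wanted?, current description), then a single dispatch pass over
--     # the joined records routes each group to its category; no set algebra and
--     # no membership tests at classification time.
--     joined = {}
--     for group in desired_groups:
--         joined[group] = (True, None)
--     for group, attrs in current_groups.items():
--         joined[group] = (group in joined, attrs.get("description"))
--
--     correct, missing, extra, incorrect = set(), set(), set(), set()
--     for group, (wanted, description) in joined.items():
--         if not wanted:
--             extra.add(group)
--         elif description is None:
--             missing.add(group)
--         elif description == desired_description:
--             correct.add(group)
--         else:
--             incorrect.add(group)
--
--     return {"correct": correct, "missing": missing, "extra": extra, "incorrect": incorrect}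
-- ===== Notes on version B (the rewrite author's own statement) =====
-- stated objective: alternative
-- what changed: Replaces A's set.difference/intersection algebra plus a separate loop over the intersection by an outer-join: one record table group -> (wanted?, current description) built from both inputs, then a single dispatch pass over the joined records that routes each group to correct/missing/extra/incorrect.
import Mathlib
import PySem

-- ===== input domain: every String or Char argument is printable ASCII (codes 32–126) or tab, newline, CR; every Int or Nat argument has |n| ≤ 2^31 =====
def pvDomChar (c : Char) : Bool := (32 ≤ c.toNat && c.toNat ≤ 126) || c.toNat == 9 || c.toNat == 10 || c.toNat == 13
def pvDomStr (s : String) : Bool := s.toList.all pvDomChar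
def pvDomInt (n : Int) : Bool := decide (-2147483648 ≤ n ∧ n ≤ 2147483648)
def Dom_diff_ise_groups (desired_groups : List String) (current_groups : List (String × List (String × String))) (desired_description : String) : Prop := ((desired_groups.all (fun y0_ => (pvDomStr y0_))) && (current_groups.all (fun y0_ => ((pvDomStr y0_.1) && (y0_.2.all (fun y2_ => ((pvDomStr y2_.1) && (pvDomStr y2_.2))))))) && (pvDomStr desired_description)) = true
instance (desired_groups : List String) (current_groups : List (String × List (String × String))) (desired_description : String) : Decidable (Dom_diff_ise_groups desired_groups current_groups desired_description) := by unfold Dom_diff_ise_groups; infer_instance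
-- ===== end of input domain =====

-- B replaces A's set.difference/intersection algebra by an outer-join record table
-- (group -> (wanted?, current description)) classified in one dispatch pass (objective: alternative).


-- ===== PORT A =====
def diff_ise_groups (desired_groups : List String) (current_groups : List (String × List (String × String))) (desired_description : String) : List (String × List String) :=
  let cur : PySem.Dict String (List (String × String)) := PySem.Dict.ofList current_groups
  let dset : PySem.Set String := PySem.Set.ofList desired_groups
  let set_current_groups : PySem.Set String := PySem.Set.ofList cur.keys
  let missing_groups := PySem.Set.diff dset set_current_groups
  let extra_groups := PySem.Set.diff set_current_groups dset
  let existing_groups := PySem.Set.inter dset set_current_groups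
  -- 'current_groups[group]["description"]' (Python raises KeyError when absent; those inputs are outside Pre_)
  let pr := existing_groups.foldl
    (fun (p : PySem.Set String × PySem.Set String) group =>
      if PySem.Dict.getD (PySem.Dict.ofList (PySem.Dict.getD cur group [])) "description" "" ≠ desired_description
      then (p.1, PySem.Set.add p.2 group)
      else (PySem.Set.add p.1 group, p.2))
    (PySem.Set.empty, PySem.Set.empty)
  [("correct", pr.1), ("missing", missing_groups), ("extra", extra_groups), ("incorrect", pr.2)]

-- ===== PORT B =====
def diff_ise_groups_alt (desired_groups : List String) (current_groups : List (String × List (String × String))) (desired_description : String) : List (String × List String) :=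
  let cur : PySem.Dict String (List (String × String)) := PySem.Dict.ofList current_groups
  -- joined[group] = (True, None) for every desired group
  let j0 : PySem.Dict String (Bool × Option String) :=
    desired_groups.foldl (fun d g => d.insert g ((true : Bool), (none : Option String))) PySem.Dict.empty
  -- joined[group] = (group in joined, attrs.get("description")) for every current group
  let joined := cur.items.foldl
    (fun d p => d.insert p.1 (d.contains p.1, (PySem.Dict.ofList p.2).get? "description")) j0
  -- single dispatch pass over the joined records
  let quad := joined.items.foldl
    (fun (s : PySem.Set String × PySem.Set String × PySem.Set String × PySem.Set String) p =>
      if !p.2.1 then (s.1, s.2.1, PySem.Set.add s.2.2.1 p.1, s.2.2.2)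
      else match p.2.2 with
        | none => (s.1, PySem.Set.add s.2.1 p.1, s.2.2.1, s.2.2.2)
        | some description =>
          if description == desired_description
          then (PySem.Set.add s.1 p.1, s.2.1, s.2.2.1, s.2.2.2)
          else (s.1, s.2.1, s.2.2.1, PySem.Set.add s.2.2.2 p.1))
    (PySem.Set.empty, PySem.Set.empty, PySem.Set.empty, PySem.Set.empty)
  [("correct", quad.1), ("missing", quad.2.1), ("extra", quad.2.2.1), ("incorrect", quad.2.2.2)]

-- ===== PRECONDITION & SPEC =====
-- Pre_ excludes exactly the inputs on which Python A raises KeyError: a group both desired and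
-- present in current_groups whose inner dict has no "description" key.
def Pre_diff_ise_groups (desired_groups : List String) (current_groups : List (String × List (String × String))) (desired_description : String) : Prop :=
  ∀ g ∈ desired_groups, ∀ v, (PySem.Dict.ofList current_groups).get? g = some v →
    (PySem.Dict.ofList v).contains "description" = true
instance (desired_groups : List String) (current_groups : List (String × List (String × String))) (desired_description : String) : Decidable (Pre_diff_ise_groups desired_groups current_groups desired_description) := by unfold Pre_diff_ise_groups; infer_instance
def pvWitness_diff_ise_groups : List String × (List (String × List (String × String))) × String :=
  (["g1", "g2"], [("g1", [("id", "1"), ("description", "d")]), ("g3", [("id", "3"), ("description", "x")])], "d")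

def Spec_diff_ise_groups (desired_groups : List String) (current_groups : List (String × List (String × String))) (desired_description : String) (out : List (String × List String)) : Prop := out = diff_ise_groups_alt desired_groups current_groups desired_description
instance (desired_groups : List String) (current_groups : List (String × List (String × String))) (desired_description : String) (out : List (String × List String)) : Decidable (Spec_diff_ise_groups desired_groups current_groups desired_description out) := by unfold Spec_diff_ise_groups; infer_instance

-- ===== CLAIM (what is proved, stated in full; the proofs are below) =====
def Claim_equal_diff_ise_groups : Prop := ∀ (desired_groups : List String) (current_groups : List (String × List (String × String))) (desired_description : String), Dom_diff_ise_groups desired_groups current_groups desired_description → Pre_diff_ise_groups desired_groups current_groups desired_description → Spec_diff_ise_groups desired_groups current_groups desired_description (diff_ise_groups desired_groups current_groups desired_description)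

-- ===== LEMMAS AND PROOFS =====

-- the description record attached to a current group during the join
def pvDsc (a : List (String × String)) : Option String := (PySem.Dict.ofList a).get? "description"

-- description held by the joined table for a key, as a function of the processed items
def pvFd (L : List (String × List (String × String))) (g : String) : Option String :=
  match L.find? (fun q => q.1 == g) with
  | some q => pvDsc q.2
  | none => none

-- ========== A-side lemmas (reduce the set algebra to filters) ==========

-- set(filter) = filter(set): filtering commutes with first-occurrence dedup
lemma ofList_filter {α : Type} [BEq α] [LawfulBEq α] (p : α → Bool) (xs : List α) :
    PySem.Set.ofList (xs.filter p) = (PySem.Set.ofList xs).filter p := by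
  induction xs using List.reverseRecOn with
  | nil => rfl
  | append_singleton xs x ih =>
    rw [List.filter_append, PySem.Set.ofList_append_singleton]
    by_cases hp : p x = true
    · simp only [List.filter_singleton, hp, cond_true]
      rw [PySem.Set.ofList_append_singleton, ih, PySem.Set.add_eq_ite, PySem.Set.add_eq_ite]
      by_cases hx : x ∈ PySem.Set.ofList xs
      · rw [if_pos hx, if_pos (by simp [List.mem_filter, hx, hp])]
      · rw [if_neg hx, if_neg (by simp [List.mem_filter, hx]),
          List.filter_append, List.filter_singleton, hp, cond_true]
    · rw [Bool.not_eq_true] at hp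
      simp only [List.filter_singleton, hp, cond_false, List.append_nil, ih, PySem.Set.add_eq_ite]
      by_cases hx : x ∈ PySem.Set.ofList xs
      · rw [if_pos hx]
      · rw [if_neg hx, List.filter_append, List.filter_singleton, hp, cond_false, List.append_nil]

-- 'for g in xs: if p(g): s.add(g)' (from the empty set) builds set(filter(p, xs))
lemma foldl_add_if {α : Type} [BEq α] [LawfulBEq α] (p : α → Bool) (xs : List α) :
    xs.foldl (fun s g => if p g then PySem.Set.add s g else s) PySem.Set.empty
      = (PySem.Set.ofList xs).filter p := by
  rw [PySem.List.foldl_if_eq_foldl_filter]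
  exact ofList_filter p xs

-- A's two-accumulator classify loop is two independent conditional-add loops
lemma pair_split (q : String → Prop) [DecidablePred q] (l : List String) :
    l.foldl
      (fun (p : PySem.Set String × PySem.Set String) g =>
        if q g then (p.1, PySem.Set.add p.2 g) else (PySem.Set.add p.1 g, p.2))
      (PySem.Set.empty, PySem.Set.empty)
    = (l.foldl (fun s g => if decide ¬ q g then PySem.Set.add s g else s) PySem.Set.empty,
       l.foldl (fun s g => if decide (q g) then PySem.Set.add s g else s) PySem.Set.empty) := by
  suffices h : ∀ (a b : PySem.Set String),
      l.foldl (fun (p : PySem.Set String × PySem.Set String) g =>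
          if q g then (p.1, PySem.Set.add p.2 g) else (PySem.Set.add p.1 g, p.2)) (a, b)
        = (l.foldl (fun s g => if decide ¬ q g then PySem.Set.add s g else s) a,
           l.foldl (fun s g => if decide (q g) then PySem.Set.add s g else s) b) from h _ _
  induction l with
  | nil => intro a b; rfl
  | cons g t ih =>
    intro a b
    by_cases hq : q g <;> simp only [List.foldl_cons, hq, if_pos, if_neg, decide_true,
      decide_false, not_true, not_false_iff] <;> simp [ih]

-- membership in the dedup'd key set is the dict's containment test
lemma contains_ofList_keys (cg : List (String × List (String × String))) (x : String) :
    PySem.Set.contains (PySem.Set.ofList (PySem.Dict.ofList cg).keys) x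
      = (PySem.Dict.ofList cg).contains x := by
  rw [PySem.Dict.contains_eq_decide_mem_keys]
  simp [PySem.Set.contains_eq_listContains, PySem.Set.mem_ofList]

-- ========== B-side lemmas (characterise the joined table and the dispatch pass) ==========

-- phase 1 of the join: the table holds each distinct desired group with record (true, none)
lemma joined_phase1 (dg : List String) :
    (dg.foldl (fun d g => d.insert g ((true : Bool), (none : Option String))) PySem.Dict.empty).items
      = (PySem.Set.ofList dg).map (fun g => (g, ((true : Bool), (none : Option String)))) := by
  induction dg using List.reverseRecOn with
  | nil => rfl
  | append_singleton xs x ih =>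
    rw [List.foldl_append, List.foldl_cons, List.foldl_nil, PySem.Set.ofList_append_singleton]
    have hkeys : (xs.foldl (fun d g => d.insert g ((true : Bool), (none : Option String))) PySem.Dict.empty).contains x
        = decide (x ∈ PySem.Set.ofList xs) := by
      rw [PySem.Dict.contains_eq_decide_mem_keys,
        PySem.Dict.keys_foldl_insert (f := fun _ _ => ((true : Bool), (none : Option String)))]
      simp [PySem.Set.mem_update, PySem.Set.mem_ofList, PySem.Dict.keys_empty]
    by_cases hx : x ∈ PySem.Set.ofList xs
    · rw [PySem.Dict.items_insert_of_contains _ _ (by rw [hkeys]; simpa using hx),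
        PySem.Set.add_of_mem hx, ih, List.map_map]
      refine List.map_congr_left (fun g _ => ?_)
      by_cases hgx : g = x <;> simp [Function.comp, hgx]
    · rw [PySem.Dict.items_insert_of_not_contains _ _ (by rw [hkeys]; simpa using hx),
        PySem.Set.add_of_not_mem hx, ih, List.map_append]
      rfl

-- phase 2 of the join: desired records pick up the current description (pvFd), current-only
-- groups are appended with record (false, description)
lemma joined_phase2 (dg : List String) (L : List (String × List (String × String)))
    (hnd : (L.map Prod.fst).Nodup) :
    (L.foldl (fun d p => d.insert p.1 (d.contains p.1, (PySem.Dict.ofList p.2).get? "description"))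
        (dg.foldl (fun d g => d.insert g ((true : Bool), (none : Option String))) PySem.Dict.empty)).items
      = (PySem.Set.ofList dg).map (fun g => (g, ((true : Bool), pvFd L g)))
        ++ (L.filter (fun p => !(decide (p.1 ∈ dg)))).map (fun p => (p.1, ((false : Bool), pvDsc p.2))) := by
  induction L using List.reverseRecOn with
  | nil =>
    simpa [pvFd] using joined_phase1 dg
  | append_singleton xs p ih =>
    rw [List.map_append, List.nodup_append] at hnd
    obtain ⟨hndxs, -, hdisj⟩ := hnd
    have hpnotxs : p.1 ∉ xs.map Prod.fst := by
      intro h; exact absurd rfl (hdisj p.1 h p.1 (by simp))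
    have ih' := ih hndxs
    rw [List.foldl_append, List.foldl_cons, List.foldl_nil]
    have hcont : (xs.foldl (fun d p => d.insert p.1 (d.contains p.1, (PySem.Dict.ofList p.2).get? "description"))
        (dg.foldl (fun d g => d.insert g ((true : Bool), (none : Option String))) PySem.Dict.empty)).contains p.1
        = decide (p.1 ∈ dg) := by
      rw [PySem.Dict.contains_eq_decide_mem_keys,
        PySem.Dict.keys_foldl_insert_key (key := Prod.fst)
          (f := fun d p => (d.contains p.1, (PySem.Dict.ofList p.2).get? "description")),
        PySem.Dict.keys_foldl_insert (f := fun _ _ => ((true : Bool), (none : Option String)))]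
      simp [PySem.Set.mem_update, PySem.Set.mem_ofList, PySem.Dict.keys_empty, hpnotxs]
    have hFd_ne : ∀ g, g ≠ p.1 → pvFd (xs ++ [p]) g = pvFd xs g := by
      intro g hg
      have hb : (p.1 == g) = false := by simp [Ne.symm hg]
      unfold pvFd
      rw [List.find?_append]
      cases hf : xs.find? (fun q => q.1 == g) with
      | some q => simp [hf]
      | none => simp [hf, List.find?, hb]
    have hFd_p : pvFd (xs ++ [p]) p.1 = pvDsc p.2 := by
      have hf : xs.find? (fun q => q.1 == p.1) = none := by
        rw [List.find?_eq_none]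
        intro q hq hbeq
        exact hpnotxs (by simpa [← eq_of_beq hbeq] using List.mem_map_of_mem (f := Prod.fst) hq)
      unfold pvFd
      rw [List.find?_append]
      simp [hf, List.find?]
    by_cases hp : p.1 ∈ dg
    · have hdec : decide (p.1 ∈ dg) = true := by simpa using hp
      rw [hcont, hdec, PySem.Dict.items_insert_of_contains _ _ (hcont.trans hdec), ih',
        List.map_append, List.map_map, List.map_map, List.filter_append]
      have hfilt : [p].filter (fun p => !(decide (p.1 ∈ dg))) = [] := by simp [hp]
      rw [hfilt, List.append_nil]
      congr 1
      · refine List.map_congr_left (fun g hg => ?_)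
        by_cases hgp : g = p.1
        · subst hgp; simp [Function.comp, hFd_p, pvDsc]
        · simp [Function.comp, hgp, hFd_ne g hgp]
      · refine List.map_congr_left (fun q hq => ?_)
        have hqne : q.1 ≠ p.1 := by
          intro h
          exact hpnotxs (by simpa [← h] using List.mem_map_of_mem (f := Prod.fst) (List.mem_of_mem_filter hq))
        simp [Function.comp, hqne]
    · have hdec : decide (p.1 ∈ dg) = false := by simpa using hp
      rw [hcont, hdec, PySem.Dict.items_insert_of_not_contains _ _ (hcont.trans hdec), ih',
        List.append_assoc]
      have hfilt : [p].filter (fun p => !(decide (p.1 ∈ dg))) = [p] := by simp [hp]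
      congr 1
      · refine List.map_congr_left (fun g hg => ?_)
        have hgp : g ≠ p.1 := fun h => hp (h ▸ (by simpa [PySem.Set.mem_ofList] using hg))
        simp [hFd_ne g hgp]
      · rw [List.filter_append, hfilt, List.map_append]
        congr 1

-- pvFd over a whole dict's items is the inner-dict description lookup
lemma pvFd_items (cg : List (String × List (String × String))) (g : String) :
    pvFd (PySem.Dict.ofList cg).items g
      = pvDsc ((PySem.Dict.ofList cg).getD g []) := by
  have hnd : (PySem.Dict.ofList cg).keys.Nodup := PySem.Dict.nodup_keys_ofList cg
  cases h : (PySem.Dict.ofList cg).get? g with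
  | none =>
    have hf : (PySem.Dict.ofList cg).items.find? (fun q => q.1 == g) = none := by
      rw [List.find?_eq_none]
      intro q hq hbeq
      have hm : (q.1, q.2) ∈ (PySem.Dict.ofList cg).items := by simpa using hq
      have hg := PySem.Dict.get?_of_mem_items _ hm hnd
      rw [eq_of_beq hbeq] at hg
      simp [h] at hg
    rw [PySem.Dict.getD_of_get?_eq_none _ _ h]
    unfold pvFd
    rw [hf]
    rfl
  | some v =>
    have hmem : (g, v) ∈ (PySem.Dict.ofList cg).items := PySem.Dict.mem_items_of_get?_eq_some _ h
    cases hf : (PySem.Dict.ofList cg).items.find? (fun q => q.1 == g) with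
    | none =>
      rw [List.find?_eq_none] at hf
      have := hf _ hmem
      simp at this
    | some q =>
      have hqmem := List.mem_of_find?_eq_some hf
      have hqfst : q.1 = g := by
        have hbq := List.find?_some hf
        simpa using hbq
      have hq2 : (q.1, q.2) ∈ (PySem.Dict.ofList cg).items := by simpa using hqmem
      have hget := PySem.Dict.get?_of_mem_items _ hq2 hnd
      rw [hqfst, h] at hget
      rw [PySem.Dict.getD_of_get?_eq_some _ _ h]
      unfold pvFd
      rw [hf]
      simp [Option.some_inj.mp hget]

-- B's dispatch fold is four independent conditional-add loops
lemma quad_split (dd : String) (J : List (String × (Bool × Option String))) :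
    J.foldl
      (fun (s : PySem.Set String × PySem.Set String × PySem.Set String × PySem.Set String) p =>
        if !p.2.1 then (s.1, s.2.1, PySem.Set.add s.2.2.1 p.1, s.2.2.2)
        else match p.2.2 with
          | none => (s.1, PySem.Set.add s.2.1 p.1, s.2.2.1, s.2.2.2)
          | some description =>
            if description == dd
            then (PySem.Set.add s.1 p.1, s.2.1, s.2.2.1, s.2.2.2)
            else (s.1, s.2.1, s.2.2.1, PySem.Set.add s.2.2.2 p.1))
      (PySem.Set.empty, PySem.Set.empty, PySem.Set.empty, PySem.Set.empty)
    = (J.foldl (fun s p => if p.2.1 && (p.2.2 == some dd) then PySem.Set.add s p.1 else s) PySem.Set.empty,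
       J.foldl (fun s p => if p.2.1 && (p.2.2 == (none : Option String)) then PySem.Set.add s p.1 else s) PySem.Set.empty,
       J.foldl (fun s p => if !p.2.1 then PySem.Set.add s p.1 else s) PySem.Set.empty,
       J.foldl (fun s p => if p.2.1 && !(p.2.2 == (none : Option String)) && !(p.2.2 == some dd) then PySem.Set.add s p.1 else s) PySem.Set.empty) := by
  suffices h : ∀ (a b c d : PySem.Set String),
      J.foldl
        (fun (s : PySem.Set String × PySem.Set String × PySem.Set String × PySem.Set String) p =>
          if !p.2.1 then (s.1, s.2.1, PySem.Set.add s.2.2.1 p.1, s.2.2.2)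
          else match p.2.2 with
            | none => (s.1, PySem.Set.add s.2.1 p.1, s.2.2.1, s.2.2.2)
            | some description =>
              if description == dd
              then (PySem.Set.add s.1 p.1, s.2.1, s.2.2.1, s.2.2.2)
              else (s.1, s.2.1, s.2.2.1, PySem.Set.add s.2.2.2 p.1)) (a, b, c, d)
        = (J.foldl (fun s p => if p.2.1 && (p.2.2 == some dd) then PySem.Set.add s p.1 else s) a,
           J.foldl (fun s p => if p.2.1 && (p.2.2 == (none : Option String)) then PySem.Set.add s p.1 else s) b,
           J.foldl (fun s p => if !p.2.1 then PySem.Set.add s p.1 else s) c,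
           J.foldl (fun s p => if p.2.1 && !(p.2.2 == (none : Option String)) && !(p.2.2 == some dd) then PySem.Set.add s p.1 else s) d) from h _ _ _ _
  induction J with
  | nil => intro a b c d; rfl
  | cons p t ih =>
    intro a b c d
    obtain ⟨g, w, o⟩ := p
    rw [List.foldl_cons, List.foldl_cons, List.foldl_cons, List.foldl_cons, List.foldl_cons]
    cases w
    · simpa using ih _ _ _ _
    · cases o with
      | none => simpa using ih _ _ _ _
      | some v =>
        by_cases hv : v = dd
        · simpa [hv] using ih _ _ _ _
        · simpa [hv] using ih _ _ _ _

-- a conditional-add loop over records with distinct keys collects the filtered keys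
lemma cond_add_fold (q : String × (Bool × Option String) → Bool)
    (J : List (String × (Bool × Option String))) (s0 : PySem.Set String)
    (hnd : (J.map Prod.fst).Nodup) (hs0 : ∀ p ∈ J, p.1 ∉ s0) :
    J.foldl (fun s p => if q p then PySem.Set.add s p.1 else s) s0
      = s0 ++ (J.filter q).map Prod.fst := by
  induction J generalizing s0 with
  | nil => simp
  | cons p t ih =>
    rw [List.map_cons, List.nodup_cons] at hnd
    by_cases hq : q p = true
    · have hs0' : ∀ r ∈ t, r.1 ∉ s0 ++ [p.1] := by
        intro r hr
        simp only [List.mem_append, List.mem_singleton]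
        rintro (h | h)
        · exact hs0 r (by simp [hr]) h
        · exact hnd.1 (h ▸ List.mem_map_of_mem (f := Prod.fst) hr)
      rw [List.foldl_cons, if_pos hq, PySem.Set.add_of_not_mem (hs0 p (by simp)),
        ih _ hnd.2 hs0', List.filter_cons_of_pos hq]
      simp
    · have hs0' : ∀ r ∈ t, r.1 ∉ s0 := fun r hr => hs0 r (by simp [hr])
      rw [List.foldl_cons, if_neg hq, ih _ hnd.2 hs0',
        List.filter_cons_of_neg (by simpa using hq)]

-- ===== VERDICT (by name: the statement is the Claim_ definition above) =====
theorem diff_ise_groups_spec : Claim_equal_diff_ise_groups := by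
  intro dg cg desc _ hpre
  unfold Spec_diff_ise_groups
  simp only [diff_ise_groups, diff_ise_groups_alt]
  rw [pair_split, foldl_add_if, foldl_add_if]
  have hndk : ((PySem.Dict.ofList cg).items.map Prod.fst).Nodup := by
    simpa [PySem.Dict.keys] using PySem.Dict.nodup_keys_ofList cg
  rw [joined_phase2 dg _ hndk, quad_split]
  have hndJ : ((((PySem.Set.ofList dg).map (fun g => (g, ((true : Bool), pvFd (PySem.Dict.ofList cg).items g))))
      ++ (((PySem.Dict.ofList cg).items.filter (fun p => !(decide (p.1 ∈ dg)))).map (fun p => (p.1, ((false : Bool), pvDsc p.2))))).map Prod.fst).Nodup := by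
    rw [List.map_append, List.map_map, List.map_map]
    have h1 : ((PySem.Set.ofList dg).map (Prod.fst ∘ fun g => (g, ((true : Bool), pvFd (PySem.Dict.ofList cg).items g)))) = PySem.Set.ofList dg := by
      exact List.map_id _
    have h2 : (((PySem.Dict.ofList cg).items.filter (fun p => !(decide (p.1 ∈ dg)))).map (Prod.fst ∘ fun p => (p.1, ((false : Bool), pvDsc p.2))))
        = ((PySem.Dict.ofList cg).items.filter (fun p => !(decide (p.1 ∈ dg)))).map Prod.fst :=
      List.map_congr_left (fun q _ => rfl)
    rw [h1, h2, List.nodup_append]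
    refine ⟨PySem.Set.nodup_ofList dg, (List.Sublist.map Prod.fst (List.filter_sublist (l := (PySem.Dict.ofList cg).items))).nodup hndk, ?_⟩
    intro a ha b hb hab
    subst hab
    obtain ⟨q, hq, rfl⟩ := List.mem_map.mp hb
    have := List.of_mem_filter hq
    rw [PySem.Set.mem_ofList] at ha
    simp [ha] at this
  rw [cond_add_fold _ _ _ hndJ (by simp [PySem.Set.empty]),
    cond_add_fold _ _ _ hndJ (by simp [PySem.Set.empty]),
    cond_add_fold _ _ _ hndJ (by simp [PySem.Set.empty]),
    cond_add_fold _ _ _ hndJ (by simp [PySem.Set.empty])]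
  have hkey : ∀ g ∈ dg,
      ((PySem.Dict.ofList cg).contains g = false ∧ pvFd (PySem.Dict.ofList cg).items g = none)
    ∨ (∃ w, (PySem.Dict.ofList cg).contains g = true ∧ pvFd (PySem.Dict.ofList cg).items g = some w ∧
        (PySem.Dict.ofList ((PySem.Dict.ofList cg).getD g [])).getD "description" "" = w) := by
    intro g hg
    cases hcg : (PySem.Dict.ofList cg).get? g with
    | none =>
      left
      constructor
      · rw [PySem.Dict.contains_eq_isSome_get?, hcg]; rfl
      · rw [pvFd_items, PySem.Dict.getD_of_get?_eq_none _ _ hcg]; rfl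
    | some v =>
      right
      have hcd := hpre g hg v hcg
      rw [PySem.Dict.contains_eq_isSome_get?] at hcd
      obtain ⟨w, hw⟩ := Option.isSome_iff_exists.mp hcd
      refine ⟨w, ?_, ?_, ?_⟩
      · rw [PySem.Dict.contains_eq_isSome_get?, hcg]; rfl
      · rw [pvFd_items, PySem.Dict.getD_of_get?_eq_some _ _ hcg]; exact hw
      · rw [PySem.Dict.getD_of_get?_eq_some _ _ hcg, PySem.Dict.getD_of_get?_eq_some _ _ hw]
  simp only [PySem.Set.empty, List.nil_append, List.filter_append, List.map_append,
    List.filter_map, List.map_map, Function.comp_def, Bool.true_and, Bool.false_and,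
    Bool.not_true, Bool.not_false, List.filter_false, List.map_nil, List.append_nil,
    List.nil_append]
  have hexist : (PySem.Set.inter (PySem.Set.ofList dg) (PySem.Set.ofList (PySem.Dict.ofList cg).keys)).Nodup :=
    PySem.Set.nodup_inter _ _ (PySem.Set.nodup_ofList dg)
  simp only [List.cons.injEq, Prod.mk.injEq, true_and, and_true]
  refine ⟨?_, ?_, ?_, ?_⟩
  · -- correct
    rw [PySem.Set.ofList_eq_self_of_nodup _ hexist]
    show List.filter _ (List.filter _ (PySem.Set.ofList dg)) = _
    rw [List.filter_filter, List.map_id']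
    refine List.filter_congr (fun g hg => ?_)
    have hgd : g ∈ dg := by simpa [PySem.Set.mem_ofList] using hg
    rcases hkey g hgd with ⟨hc0, hF⟩ | ⟨w, hc1, hF, hD⟩
    · have hnm : g ∉ (PySem.Dict.ofList cg).keys := by
        intro h
        have hh := (PySem.Dict.contains_iff_mem_keys _ _).mpr h
        rw [hc0] at hh
        exact Bool.false_ne_true hh
      simp [contains_ofList_keys, hc0, hF, hnm]
    · have hm : g ∈ (PySem.Dict.ofList cg).keys := (PySem.Dict.contains_iff_mem_keys _ _).mp hc1
      by_cases hwd : w = desc <;> simp [contains_ofList_keys, hc1, hF, hD, hwd, hm]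
  · -- missing
    show List.filter _ (PySem.Set.ofList dg) = _
    rw [List.map_id']
    refine List.filter_congr (fun g hg => ?_)
    have hgd : g ∈ dg := by simpa [PySem.Set.mem_ofList] using hg
    rcases hkey g hgd with ⟨hc0, hF⟩ | ⟨w, hc1, hF, hD⟩
    · have hnm : g ∉ (PySem.Dict.ofList cg).keys := by
        intro h
        have hh := (PySem.Dict.contains_iff_mem_keys _ _).mpr h
        rw [hc0] at hh
        exact Bool.false_ne_true hh
      simp [contains_ofList_keys, hc0, hF, hnm]
    · have hm : g ∈ (PySem.Dict.ofList cg).keys := (PySem.Dict.contains_iff_mem_keys _ _).mp hc1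
      simp [contains_ofList_keys, hc1, hF, hm]
  · -- extra
    rw [PySem.Set.ofList_eq_self_of_nodup _ (PySem.Dict.nodup_keys_ofList cg)]
    show List.filter _ ((PySem.Dict.ofList cg).keys) = _
    simp only [PySem.Dict.keys, List.filter_map, List.filter_true]
    have heq : List.filter ((fun x => !(PySem.Set.ofList dg).contains x) ∘ Prod.fst) (PySem.Dict.ofList cg).items
        = List.filter (fun p => !decide (p.1 ∈ dg)) (PySem.Dict.ofList cg).items :=
      List.filter_congr (fun x _ => by
        simp [Function.comp, PySem.Set.contains_eq_listContains, PySem.Set.mem_ofList])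
    rw [heq]
  · -- incorrect
    rw [PySem.Set.ofList_eq_self_of_nodup _ hexist]
    show List.filter _ (List.filter _ (PySem.Set.ofList dg)) = _
    rw [List.filter_filter, List.map_id']
    refine List.filter_congr (fun g hg => ?_)
    have hgd : g ∈ dg := by simpa [PySem.Set.mem_ofList] using hg
    rcases hkey g hgd with ⟨hc0, hF⟩ | ⟨w, hc1, hF, hD⟩
    · have hnm : g ∉ (PySem.Dict.ofList cg).keys := by
        intro h
        have hh := (PySem.Dict.contains_iff_mem_keys _ _).mpr h
        rw [hc0] at hh
        exact Bool.false_ne_true hh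
      simp [contains_ofList_keys, hc0, hF, hnm]
    · have hm : g ∈ (PySem.Dict.ofList cg).keys := (PySem.Dict.contains_iff_mem_keys _ _).mp hc1
      by_cases hwd : w = desc <;> simp [contains_ofList_keys, hc1, hF, hD, hwd, hm]
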